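-- pv_equiv track=rewrite | github.com/ParthivDataScientist/3DMax-Agent | create_complex_objs.py | merge_meshes
-- ===== SOURCE A (Python) =====
-- def merge_meshes(parts):
--     """Merge list of (verts, faces) into a single (verts, faces) with re-indexed faces."""
--     all_v, all_f = [], []
--     offset = 0
--     for verts, faces in parts:
--         all_v.extend(verts)
--         for face in faces:
--             all_f.append([i + offset for i in face])
--         offset += len(verts)
--     return all_v, all_f
-- ===== SOURCE B (Python) =====
-- def merge_meshes(parts):
--     """Merge list of (verts, faces) into a single (verts, faces) with re-indexed faces."""
--     # precompute the cumulative vertex-offset table, then flatten in two flat passes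
--     offsets = [0]
--     for verts, _ in parts:
--         offsets.append(offsets[-1] + len(verts))
--     all_v = [v for verts, _ in parts for v in verts]
--     all_f = [[i + off for i in face]
--              for off, (_, faces) in zip(offsets, parts)
--              for face in faces]
--     return all_v, all_f
-- ===== Notes on version B (the rewrite author's own statement) =====
-- stated objective: alternative
-- what changed: Replaces the single loop that threads a running offset and mutating accumulators with a precomputed cumulative vertex-offset table followed by two flat comprehension passes (flatten vertices; zip offsets with parts to shift faces).
import Mathlib
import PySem

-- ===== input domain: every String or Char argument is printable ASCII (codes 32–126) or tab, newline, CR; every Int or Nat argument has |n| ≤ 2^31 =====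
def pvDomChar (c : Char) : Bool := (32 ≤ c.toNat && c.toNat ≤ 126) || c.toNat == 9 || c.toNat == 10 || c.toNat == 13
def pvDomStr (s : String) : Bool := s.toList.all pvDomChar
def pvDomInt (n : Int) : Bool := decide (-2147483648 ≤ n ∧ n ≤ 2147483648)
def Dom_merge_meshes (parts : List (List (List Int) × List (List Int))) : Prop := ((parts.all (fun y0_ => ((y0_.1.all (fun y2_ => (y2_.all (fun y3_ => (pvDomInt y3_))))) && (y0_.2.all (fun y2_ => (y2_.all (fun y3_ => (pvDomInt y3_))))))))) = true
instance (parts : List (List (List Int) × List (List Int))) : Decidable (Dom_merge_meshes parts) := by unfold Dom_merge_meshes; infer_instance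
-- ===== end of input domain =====

-- B replaces A's threaded running offset with a precomputed cumulative offset table and
-- two flat flatten passes (objective: alternative decomposition, same cost).

-- ===== PORT A =====
-- A: one loop threading (all_v, all_f, offset); the inner loop over faces is the map.
def merge_meshes (parts : List (List (List Int) × List (List Int))) : List (List Int) × List (List Int) :=
  let st := parts.foldl
    (fun (st : List (List Int) × List (List Int) × Int) vf =>
      (st.1 ++ vf.1,
       st.2.1 ++ vf.2.map (fun face => face.map (fun i => i + st.2.2)),
       st.2.2 + (vf.1.length : Int)))
    ([], [], 0)
  (st.1, st.2.1)

-- ===== PORT B =====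
-- B: offsets built first (offsets[-1] read as getLast?.getD 0; the list always starts with 0
-- so it is never empty), then two flat comprehensions ported as flatMaps.
def merge_meshes_alt (parts : List (List (List Int) × List (List Int))) : List (List Int) × List (List Int) :=
  let offsets : List Int :=
    parts.foldl (fun offs vf => offs ++ [(offs.getLast?.getD 0) + (vf.1.length : Int)]) [0]
  let all_v := parts.flatMap (fun vf => vf.1)
  let all_f := (offsets.zip parts).flatMap
    (fun op => op.2.2.map (fun face => face.map (fun i => i + op.1)))
  (all_v, all_f)

-- ===== PRECONDITION & SPEC =====
def Spec_merge_meshes (parts : List (List (List Int) × List (List Int))) (out : List (List Int) × List (List Int)) : Prop := out = merge_meshes_alt parts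
instance (parts : List (List (List Int) × List (List Int))) (out : List (List Int) × List (List Int)) : Decidable (Spec_merge_meshes parts out) := by unfold Spec_merge_meshes; infer_instance

-- ===== CLAIM (what is proved, stated in full; the proofs are below) =====
def Claim_equal_merge_meshes : Prop := ∀ (parts : List (List (List Int) × List (List Int))), Dom_merge_meshes parts → Spec_merge_meshes parts (merge_meshes parts)

-- ===== LEMMAS AND PROOFS =====

-- the faces of `parts` shifted by the running offset starting at `o`
def pvShiftFaces (o : Int) : List (List (List Int) × List (List Int)) → List (List Int)
  | [] => []
  | p :: r => p.2.map (fun face => face.map (fun i => i + o)) ++ pvShiftFaces (o + (p.1.length : Int)) r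

-- the cumulative offset table starting at `o`
def pvOffsetsOf (o : Int) : List (List (List Int) × List (List Int)) → List Int
  | [] => [o]
  | p :: r => o :: pvOffsetsOf (o + (p.1.length : Int)) r

theorem pvFoldA (parts : List (List (List Int) × List (List Int)))
    (v f : List (List Int)) (o : Int) :
    parts.foldl
      (fun (st : List (List Int) × List (List Int) × Int) vf =>
        (st.1 ++ vf.1,
         st.2.1 ++ vf.2.map (fun face => face.map (fun i => i + st.2.2)),
         st.2.2 + (vf.1.length : Int)))
      (v, f, o)
    = (v ++ parts.flatMap (fun vf => vf.1), f ++ pvShiftFaces o parts,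
       o + ((parts.map (fun p => (p.1.length : Int))).sum)) := by
  induction parts generalizing v f o with
  | nil => simp [pvShiftFaces]
  | cons p r ih =>
      simp only [List.foldl_cons, ih, pvShiftFaces, List.flatMap_cons, List.map_cons, List.sum_cons, Prod.mk.injEq]
      refine ⟨by simp, by simp, by ring⟩

theorem pvOffsetsFold (parts : List (List (List Int) × List (List Int)))
    (acc : List Int) (o : Int) :
    parts.foldl (fun offs vf => offs ++ [(offs.getLast?.getD 0) + (vf.1.length : Int)]) (acc ++ [o])
    = acc ++ pvOffsetsOf o parts := by
  induction parts generalizing acc o with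
  | nil => simp [pvOffsetsOf]
  | cons p r ih =>
      simp only [List.foldl_cons, List.getLast?_concat, Option.getD_some]
      rw [ih (acc ++ [o]) (o + (p.1.length : Int))]
      simp [pvOffsetsOf]

theorem pvZipShift (parts : List (List (List Int) × List (List Int))) (o : Int) :
    ((pvOffsetsOf o parts).zip parts).flatMap
      (fun op => op.2.2.map (fun face => face.map (fun i => i + op.1)))
    = pvShiftFaces o parts := by
  induction parts generalizing o with
  | nil => simp [pvOffsetsOf, pvShiftFaces]
  | cons p r ih => simp [pvOffsetsOf, pvShiftFaces, ih]

-- ===== VERDICT (by name: the statement is the Claim_ definition above) =====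
theorem merge_meshes_spec : Claim_equal_merge_meshes := by
  intro parts _
  show merge_meshes parts = merge_meshes_alt parts
  simp only [merge_meshes, merge_meshes_alt]
  rw [pvFoldA parts [] [] 0, show ([0] : List Int) = [] ++ [0] from rfl,
    pvOffsetsFold parts [] 0]
  simp [pvZipShift]
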